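-- pv_equiv track=rewrite | github.com/scarecr0w12/Scarecr0w12-Cogs | skynetv2/tools.py | truncate_tool_output
-- ===== SOURCE A (Python) =====
-- MAX_TOOL_OUTPUT_CHARS = 8000  # Configurable limit for tool outputs
--
-- def truncate_tool_output(content: str, max_chars: int = MAX_TOOL_OUTPUT_CHARS) -> str:
--     """Truncate tool output with intelligent summarization for Discord compatibility.
--
--     Args:
--         content: The content to potentially truncate
--         max_chars: Maximum characters allowed (default: 8000)
--
--     Returns:
--         Original content if under limit, otherwise intelligently truncated content
--     """
--     if not content or len(content) <= max_chars:
--         return content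
--
--     # Try to truncate at paragraph boundaries first for better readability
--     paragraphs = content.split('\n\n')
--     truncated = ""
--     for para in paragraphs:
--         potential_length = len(truncated + para + '\n\n')
--         if potential_length <= max_chars - 100:  # Reserve space for truncation notice
--             truncated += para + '\n\n'
--         else:
--             break
--
--     if truncated.strip():
--         original_length = len(content)
--         truncated_length = len(truncated.rstrip())
--         omitted = original_length - truncated_length
--         return truncated.rstrip() + f"\n\n[Output truncated - {omitted:,} characters omitted for readability]"
--     else:
--         # Fallback: hard truncation with ellipsis
--         safe_limit = max_chars - 60  # Reserve space for truncation notice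
--         return content[:safe_limit] + "...\n\n[Output truncated - content too large for Discord]"
-- ===== SOURCE B (Python) =====
-- MAX_TOOL_OUTPUT_CHARS = 8000  # Configurable limit for tool outputs
--
-- def truncate_tool_output(content: str, max_chars: int = MAX_TOOL_OUTPUT_CHARS) -> str:
--     """Truncate at a paragraph boundary: build a prefix-sum table of paragraph
--     sizes, locate the cut with a binary search (bisect_right) over the table,
--     and assemble the kept prefix with one join."""
--     if not content or len(content) <= max_chars:
--         return content
--
--     paragraphs = content.split('\n\n')
--     # cums[j] = len of paragraphs[:j+1] when each is followed by '\n\n'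
--     cums = []
--     total = 0
--     for p in paragraphs:
--         total += len(p) + 2
--         cums.append(total)
--
--     # bisect_right(cums, limit): cums is strictly increasing (every step adds
--     # >= 2), so the insertion point is the number of leading paragraphs fitting
--     limit = max_chars - 100  # reserve space for the truncation notice
--     lo, hi = 0, len(cums)
--     while lo < hi:
--         mid = (lo + hi) // 2
--         if cums[mid] <= limit:
--             lo = mid + 1
--         else:
--             hi = mid
--
--     kept = ''.join(p + '\n\n' for p in paragraphs[:lo])
--     if kept.strip():
--         kept = kept.rstrip()
--         omitted = len(content) - len(kept)
--         return kept + f"\n\n[Output truncated - {omitted:,} characters omitted for readability]"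
--     return content[:max_chars - 60] + "...\n\n[Output truncated - content too large for Discord]"
-- ===== Notes on version B (the rewrite author's own statement) =====
-- stated objective: alternative
-- what changed: Replaces A's grow-and-test loop (re-concatenating and re-measuring the accumulated string per paragraph) by a prefix-sum table of paragraph sizes, a hand-written bisect_right binary search over that strictly increasing table to pick the cut, and one final join.
import Mathlib
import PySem

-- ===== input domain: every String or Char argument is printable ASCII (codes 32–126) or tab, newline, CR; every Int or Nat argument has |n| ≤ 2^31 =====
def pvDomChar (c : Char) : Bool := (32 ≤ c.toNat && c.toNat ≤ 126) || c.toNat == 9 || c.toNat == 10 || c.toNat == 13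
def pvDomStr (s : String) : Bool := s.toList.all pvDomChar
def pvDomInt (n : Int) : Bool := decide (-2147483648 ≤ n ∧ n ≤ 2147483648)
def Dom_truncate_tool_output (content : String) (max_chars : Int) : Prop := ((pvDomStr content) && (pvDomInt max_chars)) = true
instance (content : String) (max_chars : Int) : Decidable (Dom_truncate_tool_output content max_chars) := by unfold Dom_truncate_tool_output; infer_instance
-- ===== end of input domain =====

-- B replaces A's grow-and-test string loop by a prefix-sum table of paragraph sizes plus a
-- hand-written bisect_right binary search and one join (objective: alternative; return value proved equal).


-- shared helper: f"{n:,}" (thousands separators; digits grouped in threes from the right)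
-- works on reversed digit lists
def pvGroup3 : List Char → List Char
  | a :: b :: c :: d :: rest => a :: b :: c :: ',' :: pvGroup3 (d :: rest)
  | l => l

def pvCommaFmt (n : Int) : List Char :=
  if n < 0 then '-' :: (pvGroup3 (PySem.Int.toChars (-n)).reverse).reverse
  else (pvGroup3 (PySem.Int.toChars n).reverse).reverse

-- ===== PORT A =====
-- A's loop: truncated += para + '\n\n' while len(truncated + para + '\n\n') <= max_chars - 100, else break
def pvLoopA (mc : Int) : List (List Char) → List Char → List Char
  | [], acc => acc
  | p :: ps, acc =>
      if ((acc ++ p ++ ['\n', '\n']).length : Int) ≤ mc - 100 then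
        pvLoopA mc ps (acc ++ p ++ ['\n', '\n'])
      else acc

def truncate_tool_output (content : String) (max_chars : Int) : String :=
  let cs := content.toList
  if cs = [] ∨ (cs.length : Int) ≤ max_chars then content
  else
    let paragraphs := PySem.Chars.splitOn cs ['\n', '\n']
    let truncated := pvLoopA max_chars paragraphs []
    if PySem.Chars.strip truncated ≠ [] then
      let r := PySem.Chars.rstrip truncated
      let omitted : Int := (cs.length : Int) - (r.length : Int)
      String.ofList (r ++ "\n\n[Output truncated - ".toList ++ pvCommaFmt omitted
        ++ " characters omitted for readability]".toList)
    else
      String.ofList (PySem.Chars.slice cs none (some (max_chars - 60))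
        ++ "...\n\n[Output truncated - content too large for Discord]".toList)

-- ===== PORT B =====
-- B's prefix-sum table: cums[j] = total length of paragraphs[:j+1], each followed by '\n\n'
def pvCums : List (List Char) → Int → List Int
  | [], _ => []
  | p :: ps, total => (total + ((p.length : Int) + 2)) :: pvCums ps (total + ((p.length : Int) + 2))

-- B's hand-written bisect_right over the table; lo < hi ≤ cums.length keeps every lookup
-- in range (the `getD 0` default is unreachable on the states B's loop visits)
def pvBisect (cums : List Int) (limit : Int) (lo hi : Nat) : Nat :=
  if lo < hi then
    let mid := (lo + hi) / 2
    if cums.getD mid 0 ≤ limit then pvBisect cums limit (mid + 1) hi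
    else pvBisect cums limit lo mid
  else lo
termination_by hi - lo
decreasing_by all_goals omega

def truncate_tool_output_alt (content : String) (max_chars : Int) : String :=
  let cs := content.toList
  if cs = [] ∨ (cs.length : Int) ≤ max_chars then content
  else
    let paragraphs := PySem.Chars.splitOn cs ['\n', '\n']
    let cums := pvCums paragraphs 0
    let limit := max_chars - 100
    let k := pvBisect cums limit 0 cums.length
    let kept0 := PySem.Chars.join [] ((paragraphs.take k).map (fun p => p ++ ['\n', '\n']))
    if PySem.Chars.strip kept0 ≠ [] then
      let kept := PySem.Chars.rstrip kept0
      let omitted : Int := (cs.length : Int) - (kept.length : Int)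
      String.ofList (kept ++ "\n\n[Output truncated - ".toList ++ pvCommaFmt omitted
        ++ " characters omitted for readability]".toList)
    else
      String.ofList (PySem.Chars.slice cs none (some (max_chars - 60))
        ++ "...\n\n[Output truncated - content too large for Discord]".toList)

-- ===== PRECONDITION & SPEC =====
def Spec_truncate_tool_output (content : String) (max_chars : Int) (out : String) : Prop := out = truncate_tool_output_alt content max_chars
instance (content : String) (max_chars : Int) (out : String) : Decidable (Spec_truncate_tool_output content max_chars out) := by unfold Spec_truncate_tool_output; infer_instance

-- ===== CLAIM (what is proved, stated in full; the proofs are below) =====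
def Claim_equal_truncate_tool_output : Prop := ∀ (content : String) (max_chars : Int), Dom_truncate_tool_output content max_chars → Spec_truncate_tool_output content max_chars (truncate_tool_output content max_chars)

-- ===== LEMMAS AND PROOFS =====

theorem pvJoin_nil_eq_flatten (l : List (List Char)) :
    PySem.Chars.join [] l = l.flatten := by
  show List.intercalate [] l = l.flatten
  induction l with
  | nil => rfl
  | cons a t ih =>
    cases t with
    | nil => simp [List.intercalate]
    | cons b u =>
      simp only [List.intercalate, List.intersperse] at *
      simp_all

-- the number of leading paragraphs A keeps, as a recursion over sizes
def pvCountFit (limit : Int) : List Int → Int → Nat → Nat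
  | [], _, k => k
  | s :: ss, total, k =>
      if total + s > limit then k else pvCountFit limit ss (total + s) (k + 1)

theorem pvCountFit_shift (limit : Int) (ss : List Int) (total : Int) (k : Nat) :
    pvCountFit limit ss total k = k + pvCountFit limit ss total 0 := by
  induction ss generalizing total k with
  | nil => simp [pvCountFit]
  | cons s ss ih =>
    simp only [pvCountFit]
    split_ifs
    · simp
    · rw [ih (total + s) (k + 1), ih (total + s) 1]
      omega

theorem pvLoopA_eq (mc : Int) (ps : List (List Char)) (acc : List Char) :
    pvLoopA mc ps acc =
      acc ++ ((ps.take (pvCountFit (mc - 100)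
        (ps.map (fun p => (p.length : Int) + 2)) (acc.length : Int) 0)).map
          (fun p => p ++ ['\n', '\n'])).flatten := by
  induction ps generalizing acc with
  | nil => simp [pvLoopA, pvCountFit]
  | cons p ps ih =>
    simp only [pvLoopA, pvCountFit, List.map_cons]
    have hlen : (((acc ++ p ++ ['\n', '\n']).length : Nat) : Int)
        = (acc.length : Int) + ((p.length : Int) + 2) := by
      simp [List.length_append]
    by_cases h : ((acc ++ p ++ ['\n', '\n']).length : Int) ≤ mc - 100
    · have h' : ¬ ((acc.length : Int) + ((p.length : Int) + 2) > mc - 100) := by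
        rw [hlen] at h; omega
      rw [if_pos h, if_neg h', ih (acc ++ p ++ ['\n', '\n']),
        pvCountFit_shift _ _ _ 1, hlen, Nat.add_comm 1, List.take_succ_cons,
        List.map_cons, List.flatten_cons]
      simp
    · have h' : ((acc.length : Int) + ((p.length : Int) + 2) > mc - 100) := by
        rw [hlen] at h; omega
      rw [if_neg h, if_pos h']
      simp

-- countFit = length of the ≤-limit prefix of the cumulative table
theorem pvCountFit_eq_takeWhile (limit : Int) (ps : List (List Char)) (total : Int) :
    pvCountFit limit (ps.map (fun p => (p.length : Int) + 2)) total 0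
      = ((pvCums ps total).takeWhile (fun v => decide (v ≤ limit))).length := by
  induction ps generalizing total with
  | nil => rfl
  | cons p ps ih =>
    simp only [pvCums, pvCountFit, List.map_cons, List.takeWhile_cons]
    by_cases h : total + ((p.length : Int) + 2) ≤ limit
    · rw [if_neg (by omega), pvCountFit_shift, if_pos (by simpa using h)]
      simp [ih]
      omega
    · rw [if_pos (by omega), if_neg (by simpa using h)]
      rfl

theorem pvCums_gt (ps : List (List Char)) (total : Int) :
    ∀ x ∈ pvCums ps total, total < x := by
  induction ps generalizing total with
  | nil => simp [pvCums]
  | cons p ps ih =>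
    intro x hx
    simp only [pvCums, List.mem_cons] at hx
    rcases hx with rfl | hx
    · have : (0 : Int) ≤ (p.length : Int) := Int.natCast_nonneg _
      omega
    · have h2 := ih (total + ((p.length : Int) + 2)) x hx
      have : (0 : Int) ≤ (p.length : Int) := Int.natCast_nonneg _
      omega

theorem pvCums_pairwise (ps : List (List Char)) (total : Int) :
    (pvCums ps total).Pairwise (· < ·) := by
  induction ps generalizing total with
  | nil => simp [pvCums]
  | cons p ps ih =>
    simp only [pvCums]
    exact List.pairwise_cons.mpr ⟨pvCums_gt ps _, ih _⟩

theorem pvCums_mono (ps : List (List Char)) (total : Int) :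
    ∀ (i j : Nat) (hi : i < (pvCums ps total).length) (hj : j < (pvCums ps total).length),
      i ≤ j → (pvCums ps total)[i] ≤ (pvCums ps total)[j] := by
  intro i j hi hj hij
  rcases Nat.lt_or_ge i j with h | h
  · exact le_of_lt ((List.pairwise_iff_getElem.mp (pvCums_pairwise ps total)) i j hi hj h)
  · have : i = j := by omega
    subst this; exact le_rfl

-- takeWhile-prefix facts for the table
theorem pv_takeWhile_sat (p : Int → Bool) (l : List Int) : ∀ (i : Nat) (h2 : i < l.length),
    i < (l.takeWhile p).length → p l[i] = true := by
  induction l with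
  | nil => intro i h2; simp at h2
  | cons a t ih =>
    intro i h2 h
    rw [List.takeWhile_cons] at h
    by_cases pa : p a
    · rw [if_pos pa] at h
      cases i with
      | zero => simpa using pa
      | succ n =>
        simp only [List.length_cons, Nat.add_lt_add_iff_right] at h2 ⊢
        simpa using ih n (by omega) (by simpa using h)
    · rw [if_neg pa] at h; simp at h

theorem pv_takeWhile_stop (p : Int → Bool) (l : List Int) :
    ∀ (h : (l.takeWhile p).length < l.length),
    ¬ p (l[(l.takeWhile p).length]'h) = true := by
  induction l with
  | nil => intro h; simp at h
  | cons a t ih =>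
    intro h
    by_cases pa : p a
    · have he : (a :: t).takeWhile p = a :: t.takeWhile p := by
        rw [List.takeWhile_cons, if_pos pa]
      rw [List.takeWhile_cons, if_pos pa] at h
      simp only [he, List.length_cons, List.getElem_cons_succ]
      exact ih (by simpa using h)
    · have he : (a :: t).takeWhile p = [] := by
        rw [List.takeWhile_cons, if_neg pa]
      simp only [he, List.length_nil, List.getElem_cons_zero]
      exact pa

-- binary-search correctness: with the invariants, pvBisect lands on the ≤-limit prefix length
theorem pvBisect_base (cums : List Int) (limit : Int) (lo : Nat) (hlon : lo ≤ cums.length)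
    (Hlo : ∀ (i : Nat) (h : i < cums.length), i < lo → cums[i] ≤ limit)
    (Hhi : ∀ (i : Nat) (h : i < cums.length), lo ≤ i → limit < cums[i]) :
    lo = (cums.takeWhile (fun v => decide (v ≤ limit))).length := by
  have hrn : (cums.takeWhile (fun v => decide (v ≤ limit))).length ≤ cums.length :=
    (List.takeWhile_prefix _).length_le
  rcases Nat.lt_trichotomy lo ((cums.takeWhile (fun v => decide (v ≤ limit))).length) with h | h | h
  · exfalso
    have hlon2 : lo < cums.length := by omega
    have h1 := pv_takeWhile_sat (fun v => decide (v ≤ limit)) cums lo hlon2 h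
    have h2 := Hhi lo hlon2 (le_refl _)
    simp at h1; omega
  · exact h
  · exfalso
    have hrn2 : (cums.takeWhile (fun v => decide (v ≤ limit))).length < cums.length := by omega
    have h1 := pv_takeWhile_stop (fun v => decide (v ≤ limit)) cums hrn2
    have h2 := Hlo _ hrn2 h
    simp at h1; omega

theorem pvBisect_eq (cums : List Int) (limit : Int)
    (mono : ∀ (i j : Nat) (hi : i < cums.length) (hj : j < cums.length), i ≤ j → cums[i] ≤ cums[j]) :
    ∀ (fuel lo hi : Nat), hi - lo ≤ fuel → lo ≤ hi → hi ≤ cums.length →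
    (∀ (i : Nat) (h : i < cums.length), i < lo → cums[i] ≤ limit) →
    (∀ (i : Nat) (h : i < cums.length), hi ≤ i → limit < cums[i]) →
    pvBisect cums limit lo hi = (cums.takeWhile (fun v => decide (v ≤ limit))).length := by
  intro fuel
  induction fuel with
  | zero =>
    intro lo hi hfuel hlohi hhin Hlo Hhi
    have hle : lo = hi := by omega
    subst hle
    rw [pvBisect, if_neg (by omega)]
    exact pvBisect_base cums limit lo hhin Hlo Hhi
  | succ fuel ih =>
    intro lo hi hfuel hlohi hhin Hlo Hhi
    by_cases hlt : lo < hi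
    · rw [pvBisect, if_pos hlt]
      have hmid1 : lo ≤ (lo + hi) / 2 := by omega
      have hmid2 : (lo + hi) / 2 < hi := by omega
      have hmidn : (lo + hi) / 2 < cums.length := by omega
      have hget : cums.getD ((lo + hi) / 2) 0 = cums[(lo + hi) / 2] :=
        List.getD_eq_getElem cums 0 hmidn
      by_cases hc : cums.getD ((lo + hi) / 2) 0 ≤ limit
      · rw [if_pos hc]
        apply ih ((lo + hi) / 2 + 1) hi (by omega) (by omega) hhin
        · intro i h hi2
          calc cums[i] ≤ cums[(lo + hi) / 2] := mono i _ h hmidn (by omega)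
            _ ≤ limit := by rw [← hget]; exact hc
        · exact Hhi
      · rw [if_neg hc]
        apply ih lo ((lo + hi) / 2) (by omega) (by omega) (by omega) Hlo
        intro i h hi2
        calc limit < cums[(lo + hi) / 2] := by rw [← hget] at *; omega
          _ ≤ cums[i] := mono _ i hmidn h hi2
    · rw [pvBisect, if_neg hlt]
      have hle : lo = hi := by omega
      subst hle
      exact pvBisect_base cums limit lo hhin Hlo Hhi

-- the two selection counts agree
theorem pv_k_eq (ps : List (List Char)) (limit : Int) :
    pvBisect (pvCums ps 0) limit 0 (pvCums ps 0).length
      = pvCountFit limit (ps.map (fun p => (p.length : Int) + 2)) 0 0 := by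
  rw [pvCountFit_eq_takeWhile]
  exact pvBisect_eq (pvCums ps 0) limit (pvCums_mono ps 0) (pvCums ps 0).length 0 _
    (by omega) (by omega) (le_refl _) (by omega) (by intro i h h2; omega)

-- ===== VERDICT (by name: the statement is the Claim_ definition above) =====
theorem truncate_tool_output_spec : Claim_equal_truncate_tool_output := by
  intro content max_chars _
  unfold Spec_truncate_tool_output truncate_tool_output truncate_tool_output_alt
  simp only
  have ht : pvLoopA max_chars (PySem.Chars.splitOn content.toList ['\n', '\n']) [] =
        PySem.Chars.join []
          (((PySem.Chars.splitOn content.toList ['\n', '\n']).take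
            (pvBisect (pvCums (PySem.Chars.splitOn content.toList ['\n', '\n']) 0)
              (max_chars - 100)
              0 (pvCums (PySem.Chars.splitOn content.toList ['\n', '\n']) 0).length)).map
                (fun p => p ++ ['\n', '\n'])) := by
    rw [pvLoopA_eq, pvJoin_nil_eq_flatten, pv_k_eq]
    simp
  rw [ht]
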